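-- pv_equiv track=rewrite | github.com/mrliuzhao/AlgorithmsPython | Ch15/DividePipe.py | dividePipe
-- ===== SOURCE A (Python) =====
-- def dividePipe(n: int, k: int):
--     '''
--     将整数n分成k个整数
--
--     :param n: n
--     :param k: 分成k个整数
--     :return: 返回所有分法的数组
--     '''
--     if k == 1:
--         return [[n]]
--     # 每个部分可能最大的数
--     max_part = n - k + 1
--     res = []
--     for i in range(1, max_part + 1):
--         sub = dividePipe(n - i, k - 1)
--         for x in sub:
--             temp = [i]
--             temp.extend(x.copy())
--             res.append(temp)
--     return res
-- ===== SOURCE B (Python) =====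
-- def dividePipe(n: int, k: int):
--     # stars-and-bars: enumerate the k-1 cut positions (r-subsets of 1..n-1 in
--     # lexicographic order: pick cut position i+1, or skip it -- the skip chain
--     # runs as a while loop over the position index), then decode each cut list
--     # into a composition by taking consecutive differences.
--     num = n - 1 if n > 1 else 0   # number of candidate cut positions 1..n-1
--
--     def combs(r, i):
--         # all sorted r-element cut lists drawn from positions i+1 .. num
--         if r == 0:
--             return [[]]
--         out = []
--         while num - i >= r:
--             for tail in combs(r - 1, i + 1):
--                 out.append([i + 1] + tail)
--             i += 1
--         return out
--
--     out = []
--     for cuts in combs(k - 1, 0):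
--         row, prev = [], 0
--         for c in cuts + [n]:
--             row.append(c - prev)
--             prev = c
--         out.append(row)
--     return out
-- ===== Notes on version B (the rewrite author's own statement) =====
-- stated objective: alternative
-- what changed: Replaces A's fix-first-part-and-recurse over (n,k) with a stars-and-bars enumeration: pick-or-skip recursion over the cut positions 1..n-1 chooses k-1 cuts, and each composition is decoded as consecutive differences of the cuts.
-- outside the precondition, e.g. on dividePipe(-5, 0): A returns [], B raises RecursionError
import Mathlib
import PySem

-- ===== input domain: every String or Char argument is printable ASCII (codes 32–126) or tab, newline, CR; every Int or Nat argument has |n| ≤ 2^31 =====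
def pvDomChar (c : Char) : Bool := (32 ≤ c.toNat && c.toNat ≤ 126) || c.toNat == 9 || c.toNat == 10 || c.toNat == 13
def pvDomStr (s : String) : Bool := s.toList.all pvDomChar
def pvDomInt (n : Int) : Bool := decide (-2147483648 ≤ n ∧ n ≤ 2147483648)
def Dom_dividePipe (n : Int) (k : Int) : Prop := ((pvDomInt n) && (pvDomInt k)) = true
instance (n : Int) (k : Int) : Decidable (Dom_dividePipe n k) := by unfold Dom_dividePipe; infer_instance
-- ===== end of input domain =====

-- B replaces A's fix-first-part-and-recurse with a stars-and-bars enumeration of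
-- cut positions (pick-or-skip) decoded by consecutive differences; same cost, alternative algorithm.


-- ===== PORT A =====
-- Python A recurses on k; the port recurses on k.toNat (for k ≥ 1, exactly A's recursion;
-- k ≤ 0, where Python A has unbounded recursion, lies outside Pre_).
def dividePipeGo : Int → Nat → List (List Int)
  | _, 0 => []
  | n0, 1 => [[n0]]
  | n, (m+2) =>
    (PySem.List.pyRange 1 ((n - (m+2 : Int) + 1) + 1) 1).foldl
      (fun res i => res ++ (dividePipeGo (n - i) (m+1)).map (fun x => i :: x)) []

def dividePipe (n : Int) (k : Int) : List (List Int) := dividePipeGo n k.toNat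

-- ===== PORT B =====
-- combs r i of Source B: pick-or-skip over the cut positions i+1 .. num; the while
-- loop (test, one body pass for index i, then i += 1 and re-test) is rendered by
-- unrolling one iteration per recursive step.
def pvCombsW (num : Nat) : Nat → Nat → List (List Int)
  | 0, _ => [[]]
  | (r+1), i =>
    if _h : num < i + (r+1) then []   -- while-condition num - i >= r fails
    else (pvCombsW num r (i+1)).map (fun tail => ((i : Int) + 1) :: tail) ++ pvCombsW num (r+1) (i+1)
  termination_by r i => (r, num - i)
  decreasing_by
    · exact Prod.Lex.left _ _ (Nat.lt_succ_self r)
    · exact Prod.Lex.right _ (by omega)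

-- Source B's inner decoding loop: row/prev accumulator over cuts + [n]
def pvRow (n : Int) (cuts : List Int) : List Int :=
  ((cuts ++ [n]).foldl (fun (acc : List Int × Int) c => (acc.1 ++ [c - acc.2], c)) ([], 0)).1

-- num = n - 1 if n > 1 else 0  is (n-1).toNat
def dividePipe_alt (n : Int) (k : Int) : List (List Int) :=
  (pvCombsW (n - 1).toNat (k - 1).toNat 0).map (fun cuts => pvRow n cuts)

-- ===== PRECONDITION & SPEC =====
-- Pre_ excludes k ≤ 0, outside the natural domain ("n into k positive parts"): there Python A
-- hits RecursionError whenever n ≥ k and returns [] only by accident of an empty loop when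
-- n < k, while B's combinations helper raises RecursionError.
def Pre_dividePipe (n : Int) (k : Int) : Prop := 1 ≤ k
instance (n : Int) (k : Int) : Decidable (Pre_dividePipe n k) := by unfold Pre_dividePipe; infer_instance
def pvWitness_dividePipe : Int × Int := (6, 3)

def Spec_dividePipe (n : Int) (k : Int) (out : List (List Int)) : Prop := out = dividePipe_alt n k
instance (n : Int) (k : Int) (out : List (List Int)) : Decidable (Spec_dividePipe n k out) := by unfold Spec_dividePipe; infer_instance

-- ===== CLAIM (what is proved, stated in full; the proofs are below) =====
def Claim_equal_dividePipe : Prop := ∀ (n : Int) (k : Int), Dom_dividePipe n k → Pre_dividePipe n k → Spec_dividePipe n k (dividePipe n k)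

-- ===== LEMMAS AND PROOFS =====

-- proof-side recombination of pvCombsW: pick-or-skip as structural recursion on the list
def pvCombs : Nat → List Int → List (List Int)
  | 0, _ => [[]]
  | (_+1), [] => []
  | (r+1), first :: rest =>
    if (first :: rest).length < r + 1 then []
    else (pvCombs r rest).map (fun tail => first :: tail) ++ pvCombs (r+1) rest

-- pure diff-decoder: rowD prev l = successive differences along l
def rowD : Int → List Int → List Int
  | _, [] => []
  | prev, c :: cs => (c - prev) :: rowD c cs

theorem pvRow_foldl (l : List Int) (acc : List Int) (prev : Int) :
    (l.foldl (fun (acc : List Int × Int) c => (acc.1 ++ [c - acc.2], c)) (acc, prev)).1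
      = acc ++ rowD prev l := by
  induction l generalizing acc prev with
  | nil => simp [rowD]
  | cons c cs ih => simp [List.foldl, rowD, ih]

theorem pvRow_eq (n : Int) (cuts : List Int) : pvRow n cuts = rowD 0 (cuts ++ [n]) := by
  simpa [pvRow] using pvRow_foldl (cuts ++ [n]) [] 0

theorem rowD_shift (l : List Int) (p i n : Int) :
    rowD (p + i) (l.map (· + i) ++ [n]) = rowD p (l ++ [n - i]) := by
  induction l generalizing p with
  | nil => simp [rowD]; ring
  | cons c cs ih =>
    simp only [List.map_cons, List.cons_append, rowD]
    rw [ih c]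
    congr 1
    ring

theorem pvCombs_short : ∀ (r : Nat) (L : List Int), L.length < r → pvCombs r L = [] := by
  intro r
  induction r with
  | zero => intro L h; omega
  | succ r _ =>
    intro L h
    cases L with
    | nil => rfl
    | cons x xs => simp only [pvCombs]; rw [if_pos h]

theorem pvCombs_cons (r : Nat) (x : Int) (xs : List Int) :
    pvCombs (r+1) (x :: xs) = (pvCombs r xs).map (fun t => x :: t) ++ pvCombs (r+1) xs := by
  simp only [pvCombs]
  split
  · rename_i h
    simp only [List.length_cons] at h
    rw [pvCombs_short r xs (by omega), pvCombs_short (r+1) xs (by omega)]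
    simp
  · rfl

theorem pvCombs_map (f : Int → Int) : ∀ (L : List Int) (r : Nat),
    pvCombs r (L.map f) = (pvCombs r L).map (List.map f) := by
  intro L
  induction L with
  | nil =>
    intro r
    cases r with
    | zero => simp [pvCombs]
    | succ r => simp [pvCombs]
  | cons x xs ih =>
    intro r
    cases r with
    | zero => simp [pvCombs]
    | succ r =>
      rw [List.map_cons, pvCombs_cons, pvCombs_cons, ih r, ih (r+1)]
      simp [List.map_map, Function.comp]

def myRange (a b : Int) : List Int := (List.range (b - a).toNat).map (fun (j : Nat) => a + (j : Int))

theorem pyRange_eq_myRange (a b : Int) : PySem.List.pyRange a b 1 = myRange a b := by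
  rw [PySem.List.pyRange_one, myRange]

theorem myRange_nil (a b : Int) (h : b ≤ a) : myRange a b = [] := by
  rw [← pyRange_eq_myRange]
  exact PySem.List.pyRange_one_eq_nil h

theorem myRange_cons (a b : Int) (h : a < b) : myRange a b = a :: myRange (a+1) b := by
  rw [← pyRange_eq_myRange, ← pyRange_eq_myRange]
  exact PySem.List.pyRange_one_cons h

theorem myRange_len (a b : Int) : (myRange a b).length = (b - a).toNat := by
  simp [myRange]

theorem myRange_shift (a n i : Int) : myRange (a + i) (n + i) = (myRange a n).map (· + i) := by
  simp only [myRange, List.map_map]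
  have h : n + i - (a + i) = n - a := by ring
  rw [h]
  apply List.map_congr_left; intro j _; simp [Function.comp]; ring

-- bridge: the index/while form of Source B equals the list recursion pvCombs on the tail
theorem pvCombsW_eq_range (num : Nat) (r i : Nat) :
    pvCombsW num r i = pvCombs r (myRange ((i : Int) + 1) ((num : Int) + 1)) := by
  fun_induction pvCombsW num r i with
  | case1 i =>
    cases myRange ((i : Int) + 1) ((num : Int) + 1) <;> rfl
  | case2 r i h =>
    rw [pvCombs_short (r+1) _ (by rw [myRange_len]; omega)]
  | case3 r i h ih1 ih2 =>
    have hi : (i : Int) + 1 < (num : Int) + 1 := by omega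
    rw [myRange_cons _ _ hi, pvCombs_cons, ih1, ih2]
    have hc : ((i : Int) + 1) + 1 = ((i + 1 : Nat) : Int) + 1 := by push_cast; ring
    rw [hc]

-- the bound (n-1).toNat reproduces the position range 1..n-1 for every n
theorem myRange_toNat (n : Int) : myRange 1 (((n - 1).toNat : Int) + 1) = myRange 1 n := by
  have h : ((((n - 1).toNat : Int) + 1) - 1).toNat = (n - 1).toNat := by omega
  simp only [myRange, h]

-- key lemma: A's recursion = B's cut enumeration decoded by differences
theorem dividePipe_main : ∀ (m : Nat) (n : Int),
    dividePipeGo n (m+1) = (pvCombs m (myRange 1 n)).map (fun cuts => rowD 0 (cuts ++ [n])) := by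
  intro m
  induction m with
  | zero => intro n; simp [dividePipeGo, pvCombs, rowD]
  | succ m ih =>
    -- inner induction over the positions list (first cut a upward)
    have inner : ∀ (j : Nat) (a n : Int), j = (n - a).toNat →
        (pvCombs (m+1) (myRange a n)).map (fun cuts => rowD 0 (cuts ++ [n]))
          = (myRange a (n - m)).flatMap
              (fun i => (dividePipeGo (n - i) (m+1)).map (fun x => i :: x)) := by
      intro j
      induction j with
      | zero =>
        intro a n hj
        rw [myRange_nil a n (by omega), myRange_nil a (n - m) (by omega)]
        rw [pvCombs_short (m+1) [] (by simp)]
        simp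
      | succ j ihj =>
        intro a n hj
        have ha : a < n := by omega
        rw [myRange_cons a n ha, pvCombs_cons]
        have hshift : myRange (a+1) n = (myRange 1 (n - a)).map (· + a) := by
          have h := myRange_shift 1 (n - a) a
          have e1 : (1 : Int) + a = a + 1 := by ring
          have e2 : n - a + a = n := by ring
          rw [e1, e2] at h
          exact h
        rw [List.map_append, ihj (a+1) n (by omega)]
        by_cases hcase : a < n - m
        · -- first summand contributes the i = a block
          rw [myRange_cons a (n - m) hcase]
          simp only [List.flatMap_cons]
          congr 1
          -- map (rowD-decode) (map (a ::) (pvCombs m (myRange (a+1) n))) = map (a :: ·) (go (n-a) (m+1))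
          rw [hshift, pvCombs_map, ih (n - a)]
          simp only [List.map_map]
          apply List.map_congr_left
          intro cuts _
          simp only [Function.comp]
          have := rowD_shift cuts 0 a n
          rw [zero_add] at this
          simp only [rowD, List.cons_append]
          rw [this]
          congr 1
          ring
        · -- a ≥ n - m: no room for m more cuts after a; first summand is empty
          have hlen : (myRange (a+1) n).length < m := by
            rw [myRange_len]; omega
          rw [pvCombs_short m _ hlen, myRange_nil a (n - m) (by omega),
              myRange_nil (a+1) (n - m) (by omega)]
          simp
    intro n
    -- unfold A's step and convert the foldl to a flatMap
    show (PySem.List.pyRange 1 ((n - (m+2 : Int) + 1) + 1) 1).foldl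
        (fun res i => res ++ (dividePipeGo (n - i) (m+1)).map (fun x => i :: x)) []
      = _
    rw [PySem.List.foldl_append_eq_flatMap, pyRange_eq_myRange]
    have hb : n - (m+2 : Int) + 1 + 1 = n - m := by ring
    rw [hb, inner (n - 1).toNat 1 n (by omega)]
    simp

-- ===== VERDICT (by name: the statement is the Claim_ definition above) =====
theorem dividePipe_spec : Claim_equal_dividePipe := by
  intro n k _ hpre
  unfold Spec_dividePipe dividePipe dividePipe_alt
  have hk : Pre_dividePipe n k → 1 ≤ k := fun h => h
  have h1 : 1 ≤ k := hk hpre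
  have hm : k.toNat = (k - 1).toNat + 1 := by omega
  rw [hm, dividePipe_main, pvCombsW_eq_range]
  have h0 : ((0 : Nat) : Int) + 1 = 1 := by norm_num
  rw [h0, myRange_toNat]
  apply List.map_congr_left
  intro cuts _
  exact (pvRow_eq n cuts).symm
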